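-- pv_equiv track=rewrite | github.com/GoblinLord-nuclear/solution-of-cs50p | cs50p/prob_set_5/test_plates/plates.py | valid_number_placement
-- ===== SOURCE A (Python) =====
-- def valid_number_placement(s):
--     letters=""
--     numbers=""
--     for ch in s:
--         if ch.isalpha():
--             letters="".join([letters,ch])
--         else:
--             numbers="".join([numbers,ch])
--     return s==letters+numbers
-- ===== SOURCE B (Python) =====
-- def valid_number_placement(s):
--     seen_non_letter = False
--     for ch in s:
--         if ch.isalpha():
--             if seen_non_letter:
--                 return False
--         else:
--             seen_non_letter = True
--     return True
-- ===== Notes on version B (the rewrite author's own statement) =====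
-- stated objective: faster
-- what changed: Replaces A's two-accumulator string partition (quadratic repeated concatenation) followed by a full equality comparison with a single early-exit scan tracking one boolean flag.
import Mathlib
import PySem

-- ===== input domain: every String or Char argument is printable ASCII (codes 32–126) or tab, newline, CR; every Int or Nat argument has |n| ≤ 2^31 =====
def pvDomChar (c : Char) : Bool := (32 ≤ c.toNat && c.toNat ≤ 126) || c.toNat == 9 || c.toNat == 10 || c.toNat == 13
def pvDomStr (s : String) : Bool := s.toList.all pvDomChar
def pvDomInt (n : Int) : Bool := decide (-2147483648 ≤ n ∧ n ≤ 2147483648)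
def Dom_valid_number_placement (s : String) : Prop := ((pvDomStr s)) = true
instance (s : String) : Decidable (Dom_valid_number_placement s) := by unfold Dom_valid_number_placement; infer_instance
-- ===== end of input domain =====

-- B replaces A's two-accumulator partition-and-compare (quadratic string concatenation)
-- with a single early-exit boolean-flag scan (measured faster; same return value everywhere).

-- ===== PORT A =====
-- A builds letters/numbers accumulators over the string and compares s with their concatenation.
def valid_number_placement (s : String) : Bool :=
  let st := s.toList.foldl
    (fun (st : List Char × List Char) ch =>
      if PySem.Chars.isalpha ch then (st.1 ++ [ch], st.2) else (st.1, st.2 ++ [ch]))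
    ([], [])
  decide (s.toList = st.1 ++ st.2)

-- ===== PORT B =====
-- B: one pass with a seen-non-letter flag; an alpha char after the flag is set returns false.
def vnpGo : List Char → Bool → Bool
  | [], _ => true
  | c :: cs, seen =>
    if PySem.Chars.isalpha c then
      (if seen then false else vnpGo cs seen)
    else vnpGo cs true

def valid_number_placement_alt (s : String) : Bool := vnpGo s.toList false

-- ===== PRECONDITION & SPEC =====
def Spec_valid_number_placement (s : String) (out : Bool) : Prop := out = valid_number_placement_alt s
instance (s : String) (out : Bool) : Decidable (Spec_valid_number_placement s out) := by unfold Spec_valid_number_placement; infer_instance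

-- ===== CLAIM (what is proved, stated in full; the proofs are below) =====
def Claim_equal_valid_number_placement : Prop := ∀ (s : String), Dom_valid_number_placement s → Spec_valid_number_placement s (valid_number_placement s)

-- ===== LEMMAS AND PROOFS =====

theorem vnp_foldA (l : List Char) : ∀ (la na : List Char),
    l.foldl (fun (st : List Char × List Char) ch =>
        if PySem.Chars.isalpha ch then (st.1 ++ [ch], st.2) else (st.1, st.2 ++ [ch])) (la, na)
      = (la ++ l.filter (fun c => PySem.Chars.isalpha c),
         na ++ l.filter (fun c => !PySem.Chars.isalpha c)) := by
  induction l with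
  | nil => intro la na; simp
  | cons c cs ih =>
    intro la na
    by_cases h : PySem.Chars.isalpha c = true <;>
      simp [List.foldl_cons, h, ih]

theorem vnpGo_true (l : List Char) :
    vnpGo l true = l.all (fun c => !PySem.Chars.isalpha c) := by
  induction l with
  | nil => rfl
  | cons c cs ih =>
    by_cases h : PySem.Chars.isalpha c = true <;> simp [vnpGo, h, ih]

theorem vnpGo_false (l : List Char) :
    vnpGo l false
      = decide (l = l.filter (fun c => PySem.Chars.isalpha c)
                    ++ l.filter (fun c => !PySem.Chars.isalpha c)) := by
  induction l with
  | nil => rfl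
  | cons c cs ih =>
    by_cases h : PySem.Chars.isalpha c = true
    · simp [vnpGo, h, ih]
    · have hstep : vnpGo (c :: cs) false = cs.all (fun c => !PySem.Chars.isalpha c) := by
        simp [vnpGo, h, vnpGo_true]
      rw [hstep]
      have hf1 : (c :: cs).filter (fun c => PySem.Chars.isalpha c)
          = cs.filter (fun c => PySem.Chars.isalpha c) := by simp [h]
      have hf2 : (c :: cs).filter (fun c => !PySem.Chars.isalpha c)
          = c :: cs.filter (fun c => !PySem.Chars.isalpha c) := by simp [h]
      rw [hf1, hf2]
      rcases hfa : cs.filter (fun c => PySem.Chars.isalpha c) with _ | ⟨a, rest⟩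
      · have hiff : (c :: cs = [] ++ c :: cs.filter (fun c => !PySem.Chars.isalpha c))
              ↔ (∀ x ∈ cs, (!PySem.Chars.isalpha x) = true) := by
          constructor
          · intro heq
            have : cs = cs.filter (fun c => !PySem.Chars.isalpha c) := by
              simpa using heq
            exact List.filter_eq_self.mp this.symm
          · intro hall
            rw [List.filter_eq_self.mpr hall]
            simp
        rw [List.all_eq, decide_eq_decide]
        exact hiff.symm
      · have ha : PySem.Chars.isalpha a = true := by
          have := List.mem_filter.mp (hfa ▸ List.mem_cons_self (l := rest))
          exact this.2
        have hne : ¬ (c :: cs = (a :: rest) ++ c :: cs.filter (fun c => !PySem.Chars.isalpha c)) := by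
          intro heq
          have : c = a := by simpa using congrArg (·.head?) heq
          rw [this] at h; exact h ha
        have hall : ¬ (cs.all (fun c => !PySem.Chars.isalpha c) = true) := by
          intro hall
          have hnil : cs.filter (fun c => PySem.Chars.isalpha c) = [] := by
            apply List.filter_eq_nil_iff.mpr
            intro x hx
            have := List.all_eq_true.mp hall x hx
            simpa using this
          rw [hnil] at hfa; simp at hfa
        rw [decide_eq_false hne, Bool.eq_false_iff]
        exact hall

-- ===== VERDICT (by name: the statement is the Claim_ definition above) =====
theorem valid_number_placement_spec : Claim_equal_valid_number_placement := by
  intro s _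
  show valid_number_placement s = valid_number_placement_alt s
  simp [valid_number_placement, valid_number_placement_alt, vnp_foldA, vnpGo_false]
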